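-- pv_equiv track=rewrite | github.com/Grafrath/Java_gyeong | test.py | make_box_zigzag
-- ===== SOURCE A (Python) =====
-- def make_box_zigzag(n, w):
--     arr = []
--     num = 1
--     increasing = True  # True: 왼→오, False: 오→왼
--
--     # 총 층 수 = n을 w로 나눈 올림값
--     rows = (n + w - 1) // w
--
--     for _ in range(rows):
--         row = []  # 한 층
--
--         # w개의 칸을 채우되, n을 넘지 않으면 번호 채움
--         for _ in range(w):
--             if num <= n:
--                 row.append(num)
--                 num += 1
--             else:
--                 row.append(None)  # 남는 공간은 None 처리 (필요하면 제거 가능)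
--
--         # 지그재그 방향 처리
--         if not increasing:
--             row.reverse()
--
--         arr.append(row)
--         increasing = not increasing  # 다음 층 방향 반전
--
--     return arr
-- ===== SOURCE B (Python) =====
-- def make_box_zigzag(n, w):
--     rows = (n + w - 1) // w
--     if rows <= 0:
--         return []
--     flat = [i + 1 if i < n else None for i in range(rows * w)]
--     return [flat[r*w:(r+1)*w][::-1] if r % 2 else flat[r*w:(r+1)*w]
--             for r in range(rows)]
-- ===== Notes on version B (the rewrite author's own statement) =====
-- stated objective: simpler
-- what changed: Replaces A's stateful nested loops (running counter, append-per-cell, direction flag) with a single flat comprehension of 1..n padded with None, sliced into width-w chunks with odd-indexed chunks reversed.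
import Mathlib
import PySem

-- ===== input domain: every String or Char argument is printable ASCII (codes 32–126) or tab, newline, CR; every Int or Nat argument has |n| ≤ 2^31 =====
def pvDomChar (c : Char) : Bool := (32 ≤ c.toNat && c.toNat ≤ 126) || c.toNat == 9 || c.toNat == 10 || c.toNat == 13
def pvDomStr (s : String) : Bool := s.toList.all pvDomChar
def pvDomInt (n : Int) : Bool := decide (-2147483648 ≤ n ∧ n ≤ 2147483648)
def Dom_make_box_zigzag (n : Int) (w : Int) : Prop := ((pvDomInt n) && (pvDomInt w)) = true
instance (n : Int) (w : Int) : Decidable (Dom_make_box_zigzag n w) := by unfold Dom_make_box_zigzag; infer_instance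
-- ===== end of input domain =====

-- B fills a flat list 1..n (padded with None) in one pass and slices it into width-w
-- chunks, reversing odd-indexed chunks, instead of A's stateful nested loops: same
-- values, a simpler decomposition ("objective": simpler, not faster).

-- ===== PORT A =====
def make_box_zigzag (n : Int) (w : Int) : List (List (Option Int)) :=
  let rows := PySem.Int.floordiv (n + w - 1) w
  ((PySem.List.pyRange 0 rows 1).foldl
    (fun (st : List (List (Option Int)) × Int × Bool) _ =>
      let inner := (PySem.List.pyRange 0 w 1).foldl
        (fun (p : List (Option Int) × Int) _ =>
          if p.2 ≤ n then (p.1 ++ [some p.2], p.2 + 1) else (p.1 ++ [none], p.2))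
        ([], st.2.1)
      let row := if st.2.2 = false then inner.1.reverse else inner.1
      (st.1 ++ [row], inner.2, !st.2.2))
    ([], 1, true)).1

-- ===== PORT B =====
def make_box_zigzag_alt (n : Int) (w : Int) : List (List (Option Int)) :=
  let rows := PySem.Int.floordiv (n + w - 1) w
  if rows ≤ 0 then []
  else
    let flat := (PySem.List.pyRange 0 (rows * w) 1).map
      (fun i => if i < n then some (i + 1) else none)
    (PySem.List.pyRange 0 rows 1).map (fun r =>
      let chunk := PySem.List.slice flat (some (r * w)) (some ((r + 1) * w))
      if PySem.Int.mod r 2 ≠ 0 then chunk.reverse else chunk)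

-- ===== PRECONDITION & SPEC =====
-- Python A (and B) raise ZeroDivisionError on w == 0; total otherwise.
def Pre_make_box_zigzag (n : Int) (w : Int) : Prop := w ≠ 0
instance (n : Int) (w : Int) : Decidable (Pre_make_box_zigzag n w) := by unfold Pre_make_box_zigzag; infer_instance
def pvWitness_make_box_zigzag : Int × Int := (7, 3)

def Spec_make_box_zigzag (n : Int) (w : Int) (out : List (List (Option Int))) : Prop := out = make_box_zigzag_alt n w
instance (n : Int) (w : Int) (out : List (List (Option Int))) : Decidable (Spec_make_box_zigzag n w out) := by unfold Spec_make_box_zigzag; infer_instance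

-- ===== CLAIM (what is proved, stated in full; the proofs are below) =====
def Claim_equal_make_box_zigzag : Prop := ∀ (n : Int) (w : Int), Dom_make_box_zigzag n w → Pre_make_box_zigzag n w → Spec_make_box_zigzag n w (make_box_zigzag n w)

-- ===== LEMMAS AND PROOFS =====

-- the value of a cell at flat position t (0-based), and the running counter after t cells
def pvCell (n t : Int) : Option Int := if t < n then some (t + 1) else none
def pvNum (n t : Int) : Int := min (t + 1) (max (n + 1) 1)

-- A's inner loop from counter value pvNum n t appends the cells at positions t, t+1, …
theorem pv_inner (n : Int) : ∀ (l : List Int) (t : Int) (row0 : List (Option Int)), 0 ≤ t →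
    l.foldl
      (fun (p : List (Option Int) × Int) _ =>
        if p.2 ≤ n then (p.1 ++ [some p.2], p.2 + 1) else (p.1 ++ [none], p.2))
      (row0, pvNum n t)
    = (row0 ++ (PySem.List.pyRange t (t + l.length) 1).map (pvCell n),
        pvNum n (t + l.length)) := by
  intro l
  induction l with
  | nil => intro t row0 ht; simp [PySem.List.pyRange_one_eq_nil]
  | cons x xs ih =>
    intro t row0 ht
    have hstep :
        (if pvNum n t ≤ n then (row0 ++ [some (pvNum n t)], pvNum n t + 1)
         else (row0 ++ [none], pvNum n t))
        = (row0 ++ [pvCell n t], pvNum n (t + 1)) := by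
      by_cases h : t < n
      · have h1 : pvNum n t = t + 1 := by unfold pvNum; omega
        have h2 : pvNum n (t + 1) = t + 2 := by unfold pvNum; omega
        have h2' : t + 1 + 1 = t + 2 := by ring
        simp [pvCell, h, h1, h2, h2']
      · have h1 : pvNum n t = max (n + 1) 1 := by unfold pvNum; omega
        have h2 : ¬ pvNum n t ≤ n := by rw [h1]; omega
        have h3 : pvNum n (t + 1) = pvNum n t := by unfold pvNum; omega
        simp [pvCell, h, h2, h3]
    simp only [List.foldl_cons, hstep]
    have hlen : t + ((x :: xs).length : Int) = (t + 1) + (xs.length : Int) := by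
      push_cast [List.length_cons]; ring
    rw [hlen, ih (t + 1) (row0 ++ [pvCell n t]) (by omega),
      PySem.List.pyRange_one_cons (show t < (t + 1) + (xs.length : Int) by
        have : (0:Int) ≤ (xs.length : Int) := by positivity
        omega)]
    simp [List.append_assoc]

-- the possibly reversed row produced at outer index r, in pyRange form (W = width as a list length)
def pvRow (n W r : Int) : List (Option Int) :=
  if r % 2 = 0 then (PySem.List.pyRange (r * W) (r * W + W) 1).map (pvCell n)
  else ((PySem.List.pyRange (r * W) (r * W + W) 1).map (pvCell n)).reverse

-- A's outer loop after k iterations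
theorem pv_outer (n w : Int) (W : Int) (hW : W = ((PySem.List.pyRange 0 w 1).length : Int)) :
    ∀ (k : Nat),
    ((PySem.List.pyRange 0 (k : Int) 1).foldl
      (fun (st : List (List (Option Int)) × Int × Bool) _ =>
        let inner := (PySem.List.pyRange 0 w 1).foldl
          (fun (p : List (Option Int) × Int) _ =>
            if p.2 ≤ n then (p.1 ++ [some p.2], p.2 + 1) else (p.1 ++ [none], p.2))
          ([], st.2.1)
        let row := if st.2.2 = false then inner.1.reverse else inner.1
        (st.1 ++ [row], inner.2, !st.2.2))
      ([], 1, true))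
    = ((PySem.List.pyRange 0 (k : Int) 1).map (pvRow n W),
        pvNum n ((k : Int) * W), decide ((k : Int) % 2 = 0)) := by
  have hW0 : 0 ≤ W := by rw [hW]; positivity
  intro k
  induction k with
  | zero => simp [PySem.List.pyRange_one_eq_nil, pvNum]
  | succ k ih =>
    have hcast : ((k + 1 : Nat) : Int) = (k : Int) + 1 := by push_cast; ring
    rw [hcast, PySem.List.pyRange_one_succ_right (by positivity), List.foldl_append,
      List.map_append, ih]
    simp only [List.foldl_cons, List.foldl_nil]
    have hinner := pv_inner n (PySem.List.pyRange 0 w 1) ((k : Int) * W)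
      ([] : List (Option Int)) (by positivity)
    rw [← hW] at hinner
    simp only [hinner, List.nil_append, Prod.mk.injEq]
    refine ⟨?_, ?_, ?_⟩
    · -- arr component
      congr 1
      rw [List.map_singleton, pvRow]
      by_cases hp : (k : Int) % 2 = 0
      · simp [hp]
      · simp [hp]
    · -- num component
      unfold pvNum
      congr 1
      ring
    · -- parity component
      by_cases hp : (k : Int) % 2 = 0
      all_goals simp [hp]
      all_goals omega

-- a slice of a mapped range is the mapped sub-range
theorem pv_slice_map {α : Type} (f : Int → α) (a b M : Int)
    (h0 : 0 ≤ a) (hab : a ≤ b) (hbM : b ≤ M) :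
    PySem.List.slice ((PySem.List.pyRange 0 M 1).map f) (some a) (some b)
    = (PySem.List.pyRange a b 1).map f := by
  rw [PySem.List.slice_toNat _ h0 (by omega)]
  rw [PySem.List.pyRange_one_append 0 a M h0 (by omega), List.map_append,
    List.drop_append_of_le_length (by simp [PySem.List.length_pyRange_one]; try omega)]
  have hdrop : ((PySem.List.pyRange 0 a 1).map f).drop a.toNat = [] := by
    apply List.drop_eq_nil_of_le
    simp [PySem.List.length_pyRange_one]
  rw [hdrop, List.nil_append,
    PySem.List.pyRange_one_append a b M hab hbM, List.map_append,
    List.take_append_of_le_length (by simp [PySem.List.length_pyRange_one]; try omega)]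
  rw [List.take_of_length_le (by simp [PySem.List.length_pyRange_one]; try omega)]

theorem pv_slice_nil {α : Type} (a b : Option Int) :
    PySem.List.slice ([] : List α) a b = [] := by
  cases a <;> cases b <;> simp [PySem.List.slice]

-- ===== VERDICT (by name: the statement is the Claim_ definition above) =====
theorem make_box_zigzag_spec : Claim_equal_make_box_zigzag := by
  intro n w _ hw
  have hw0 : w ≠ 0 := hw
  unfold Spec_make_box_zigzag make_box_zigzag make_box_zigzag_alt
  set rows := PySem.Int.floordiv (n + w - 1) w with hrows
  by_cases hr : rows ≤ 0
  · simp [PySem.List.pyRange_one_eq_nil hr, hr]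
  · have hr : 0 < rows := by omega
    simp only [if_neg (show ¬ rows ≤ 0 by omega)]
    set W : Int := ((PySem.List.pyRange 0 w 1).length : Int) with hWdef
    have hcast : ((rows.toNat : Nat) : Int) = rows := by omega
    have houter := pv_outer n w W hWdef rows.toNat
    rw [hcast] at houter
    simp only [houter]
    apply List.map_congr_left
    intro r hr'
    rw [PySem.List.mem_pyRange_one] at hr'
    obtain ⟨hr0, hrlt⟩ := hr'
    have hWlen : W = max w 0 := by
      rw [hWdef, PySem.List.length_pyRange_one]; omega
    have hchunk : PySem.List.slice
        ((PySem.List.pyRange 0 (rows * w) 1).map (fun i => if i < n then some (i + 1) else none))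
        (some (r * w)) (some ((r + 1) * w))
        = (PySem.List.pyRange (r * W) (r * W + W) 1).map (pvCell n) := by
      by_cases hwpos : 0 < w
      · have hWw : W = w := by omega
        rw [hWw, pv_slice_map _ (r * w) ((r + 1) * w) (rows * w)
            (mul_nonneg hr0 hwpos.le)
            (mul_le_mul_of_nonneg_right (by omega) hwpos.le)
            (mul_le_mul_of_nonneg_right (by omega) hwpos.le),
          show r * w + w = (r + 1) * w by ring]
        simp [pvCell]
      · have hwneg : w < 0 := by omega
        have hW0 : W = 0 := by omega
        have hM : rows * w ≤ 0 := by nlinarith [hr, hwneg]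
        rw [show PySem.List.pyRange 0 (rows * w) 1 = [] from
            PySem.List.pyRange_one_eq_nil hM]
        simp only [List.map_nil, pv_slice_nil, hW0]
        rw [show r * (0:Int) + 0 = r * 0 by ring,
          PySem.List.pyRange_one_eq_nil (le_refl _)]
        simp
    rw [pvRow]
    by_cases hp : r % 2 = 0
    · simp [hp, hchunk]
    · simp [hp, hchunk]
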